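-- pv_equiv track=rewrite | github.com/ashique6465/DSA | Companies/Accenture/2024/magicalNumber.py | magicalNo
-- ===== SOURCE A (Python) =====
-- def magicalNo(n):
--     count = 0
--     for i in range(n):
--         binary = bin(i)[2:]
--         changed = ''
--         for c in binary:
--             if c == '0':
--                 changed += '1'
--             else :
--                 changed += '2'
--         sum_of_digit =0
--         for c in changed:
--             sum_of_digit += int(c)
--         if sum_of_digit % 2 != 0:
--             count +=1
--     return count
-- ===== SOURCE B (Python) =====
-- def magicalNo(n):
--     # Closed form: each pair of an even number and its odd successor contributes
--     # exactly one magical number (flipping the last bit flips the parity of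
--     # bitlen+popcount); only a trailing unpaired even i needs a direct check.
--     if n <= 0:
--         return 0
--     if n % 2 == 0:
--         return n // 2
--     m = n - 1
--     if m == 0:
--         return 1
--     return (n - 1) // 2 + (m.bit_length() + bin(m).count('1')) % 2
-- ===== Notes on version B (the rewrite author's own statement) =====
-- stated objective: faster
-- what changed: Replaces the O(n log n) loop over all i below n (building each mapped binary string and summing its digits) with an O(log n) closed form: each pair of an even number and its odd successor contributes exactly one magical number, so the answer is half of n for even n, plus one direct parity check of bit_length plus popcount for the unpaired last element when n is odd.
import Mathlib
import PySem

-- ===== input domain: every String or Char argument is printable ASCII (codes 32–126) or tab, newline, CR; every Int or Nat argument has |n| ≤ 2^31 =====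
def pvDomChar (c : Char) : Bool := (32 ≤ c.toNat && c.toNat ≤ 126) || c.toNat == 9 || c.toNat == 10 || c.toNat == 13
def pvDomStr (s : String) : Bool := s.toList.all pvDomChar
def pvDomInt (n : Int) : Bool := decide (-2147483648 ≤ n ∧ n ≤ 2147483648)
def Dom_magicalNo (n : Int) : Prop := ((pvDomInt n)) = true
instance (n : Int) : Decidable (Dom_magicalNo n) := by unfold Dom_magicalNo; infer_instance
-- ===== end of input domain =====

-- B replaces A's O(n log n) loop (one mapped binary string per i < n) by an O(log n)
-- closed form: each pair of an even number and its odd successor contributes exactly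
-- one magical number, plus a direct parity check of the unpaired last element for odd n.

-- ===== PORT A =====
-- bin(i)[2:] for i ≥ 0 (the only i the loop produces), as a list of '0'/'1' chars;
-- exact hand port of Python's binary representation (bin(0)[2:] = "0").
def binDigits : Nat → List Char
  | 0 => []
  | m + 1 => binDigits ((m + 1) / 2) ++ [if (m + 1) % 2 = 1 then '1' else '0']
  decreasing_by omega

def pyBinTail (i : Int) : List Char :=
  if i = 0 then ['0'] else binDigits i.toNat

-- the body of A's "for i in range(n)" loop; int(c) on a digit char is c.toNat - 48 (exact)
def magicalBody (count i : Int) : Int :=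
  let binary := pyBinTail i
  let changed := binary.foldl (fun acc c => acc ++ [if c == '0' then '1' else '2']) ([] : List Char)
  let sum_of_digit := changed.foldl (fun s c => s + ((c.toNat : Int) - 48)) 0
  if PySem.Int.mod sum_of_digit 2 ≠ 0 then count + 1 else count

def magicalNo (n : Int) : Int :=
  (PySem.List.pyRange 0 n 1).foldl magicalBody 0

-- ===== PORT B =====
def magicalNo_alt (n : Int) : Int :=
  if n ≤ 0 then 0
  else if PySem.Int.mod n 2 = 0 then PySem.Int.floordiv n 2
  else
    let m := n - 1
    if m = 0 then 1
    else PySem.Int.floordiv (n - 1) 2 +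
         PySem.Int.mod ((PySem.Int.bitLength m + PySem.Int.bitCount m : Nat) : Int) 2

-- ===== PRECONDITION & SPEC =====
def Spec_magicalNo (n : Int) (out : Int) : Prop := out = magicalNo_alt n
instance (n : Int) (out : Int) : Decidable (Spec_magicalNo n out) := by unfold Spec_magicalNo; infer_instance

-- ===== CLAIM (what is proved, stated in full; the proofs are below) =====
def Claim_equal_magicalNo : Prop := ∀ (n : Int), Dom_magicalNo n → Spec_magicalNo n (magicalNo n)

-- ===== LEMMAS AND PROOFS =====

-- the 0/1 increment A's body performs at i = m
def indN (m : Nat) : Int :=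
  if m = 0 then 1
  else (((PySem.Int.bitLength (m : Int) + PySem.Int.bitCount (m : Int)) % 2 : Nat) : Int)

-- Nat-level closed form of B
def Bf (N : Nat) : Int :=
  if N = 0 then 0
  else if N % 2 = 0 then ((N / 2 : Nat) : Int)
  else ((N / 2 : Nat) : Int) + indN (N - 1)

-- digit value contributed by a mapped char ('0' ↦ '1' ↦ 1, otherwise '2' ↦ 2)
def chVal (c : Char) : Int := ((if c == '0' then '1' else '2').toNat : Int) - 48

lemma foldl_append_map (mapc : Char → Char) :
    ∀ (L : List Char) (acc : List Char),
      L.foldl (fun a c => a ++ [mapc c]) acc = acc ++ L.map mapc := by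
  intro L
  induction L with
  | nil => intro acc; simp
  | cons c L ih => intro acc; simp [List.foldl, ih]

lemma foldl_sum (v : Char → Int) :
    ∀ (L : List Char) (s : Int),
      L.foldl (fun s c => s + v c) s = s + (L.map v).sum := by
  intro L
  induction L with
  | nil => intro s; simp
  | cons c L ih => intro s; simp [List.foldl, ih]; ring

lemma sum_binDigits :
    ∀ m : Nat, ((binDigits m).map chVal).sum =
      ((PySem.Int.bitLength (m : Int) : Int) + (PySem.Int.bitCount (m : Int) : Int)) := by
  intro m
  induction m using binDigits.induct with
  | case1 => simp [binDigits]
  | case2 m ih =>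
    have hpos : 0 < m + 1 := Nat.succ_pos m
    rw [binDigits, List.map_append, List.sum_append, ih,
        PySem.Int.bitLength_natCast hpos, PySem.Int.bitCount_natCast hpos]
    rcases Nat.mod_two_eq_zero_or_one (m + 1) with h | h <;>
      · simp [h, chVal]
        ring

lemma magicalBody_eq (c : Int) (m : Nat) : magicalBody c (m : Int) = c + indN m := by
  by_cases hm : m = 0
  · subst hm
    simp [magicalBody, pyBinTail, indN, PySem.Int.mod]
  · have hcast : (m : Int) ≠ 0 := by exact_mod_cast hm
    unfold magicalBody pyBinTail
    rw [if_neg hcast]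
    simp only [Int.toNat_natCast]
    have hsum : (List.foldl (fun s c => s + ((c.toNat : Int) - 48)) 0
        (List.foldl (fun acc c => acc ++ [if c == '0' then '1' else '2'])
          ([] : List Char) (binDigits m)))
        = ((PySem.Int.bitLength (m : Int) + PySem.Int.bitCount (m : Int) : Nat) : Int) := by
      rw [foldl_append_map, List.nil_append, foldl_sum, List.map_map]
      have hcomp : ((fun c => ((c.toNat : Int) - 48)) ∘
          (fun c => if c == '0' then '1' else '2')) = chVal := rfl
      rw [hcomp, sum_binDigits m]
      omega
    have hmod : PySem.Int.mod
        ((PySem.Int.bitLength (m : Int) + PySem.Int.bitCount (m : Int) : Nat) : Int) 2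
        = (((PySem.Int.bitLength (m : Int) + PySem.Int.bitCount (m : Int)) % 2 : Nat) : Int) := by
      exact_mod_cast PySem.Int.mod_natCast
        (PySem.Int.bitLength (m : Int) + PySem.Int.bitCount (m : Int)) 2
    simp only [hsum, hmod]
    unfold indN
    rw [if_neg hm]
    rcases Nat.mod_two_eq_zero_or_one
      (PySem.Int.bitLength (m : Int) + PySem.Int.bitCount (m : Int)) with h | h <;> simp [h]

lemma bl_two_mul (k : Nat) (hk : 0 < k) :
    PySem.Int.bitLength ((2 * k : Nat) : Int) = PySem.Int.bitLength (k : Int) + 1 := by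
  rw [PySem.Int.bitLength_natCast (show 0 < 2 * k by omega),
      show (2 * k) / 2 = k from by omega]

lemma bc_two_mul (k : Nat) (hk : 0 < k) :
    PySem.Int.bitCount ((2 * k : Nat) : Int) = PySem.Int.bitCount (k : Int) := by
  rw [PySem.Int.bitCount_natCast (show 0 < 2 * k by omega),
      show (2 * k) % 2 = 0 from by omega, show (2 * k) / 2 = k from by omega]
  omega

lemma bl_two_mul_add_one (k : Nat) (hk : 0 < k) :
    PySem.Int.bitLength ((2 * k + 1 : Nat) : Int) = PySem.Int.bitLength (k : Int) + 1 := by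
  rw [PySem.Int.bitLength_natCast (show 0 < 2 * k + 1 by omega),
      show (2 * k + 1) / 2 = k from by omega]

lemma bc_two_mul_add_one (k : Nat) (hk : 0 < k) :
    PySem.Int.bitCount ((2 * k + 1 : Nat) : Int) = PySem.Int.bitCount (k : Int) + 1 := by
  rw [PySem.Int.bitCount_natCast (show 0 < 2 * k + 1 by omega),
      show (2 * k + 1) % 2 = 1 from by omega, show (2 * k + 1) / 2 = k from by omega]
  omega

-- flipping the last bit flips the parity: the pair 2k and 2k+1 contributes exactly 1
lemma indN_pair (k : Nat) : indN (2 * k) + indN (2 * k + 1) = 1 := by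
  rcases Nat.eq_zero_or_pos k with hk0 | hk
  · subst hk0; decide
  · unfold indN
    rw [if_neg (by omega : ¬ 2 * k = 0), if_neg (by omega : ¬ 2 * k + 1 = 0)]
    rw [bl_two_mul k hk, bc_two_mul k hk, bl_two_mul_add_one k hk, bc_two_mul_add_one k hk]
    rcases Nat.mod_two_eq_zero_or_one
      (PySem.Int.bitLength (k : Int) + PySem.Int.bitCount (k : Int)) with h | h <;>
      · have h1 : (PySem.Int.bitLength (k : Int) + 1 + PySem.Int.bitCount (k : Int)) % 2
            = 1 - (PySem.Int.bitLength (k : Int) + PySem.Int.bitCount (k : Int)) % 2 := by omega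
        have h2 : (PySem.Int.bitLength (k : Int) + 1 +
              (PySem.Int.bitCount (k : Int) + 1)) % 2
            = (PySem.Int.bitLength (k : Int) + PySem.Int.bitCount (k : Int)) % 2 := by omega
        rw [h1, h2, h]
        decide

lemma Bf_succ (N : Nat) : Bf (N + 1) = Bf N + indN N := by
  rcases Nat.even_or_odd N with ⟨k, hk⟩ | ⟨k, hk⟩
  · subst hk
    rcases Nat.eq_zero_or_pos k with hk0 | hk
    · subst hk0; decide
    · unfold Bf
      rw [if_neg (by omega : ¬ k + k + 1 = 0), if_neg (by omega : ¬ (k + k + 1) % 2 = 0),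
          if_neg (by omega : ¬ k + k = 0), if_pos (by omega : (k + k) % 2 = 0),
          show (k + k + 1) / 2 = k from by omega, show (k + k) / 2 = k from by omega,
          show k + k + 1 - 1 = k + k from by omega]
  · subst hk
    unfold Bf
    rw [if_neg (by omega : ¬ 2 * k + 1 + 1 = 0), if_pos (by omega : (2 * k + 1 + 1) % 2 = 0),
        if_neg (by omega : ¬ 2 * k + 1 = 0), if_neg (by omega : ¬ (2 * k + 1) % 2 = 0),
        show (2 * k + 1 + 1) / 2 = k + 1 from by omega,
        show (2 * k + 1) / 2 = k from by omega,
        show 2 * k + 1 - 1 = 2 * k from by omega]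
    have := indN_pair k
    omega

lemma alt_eq_Bf (N : Nat) : magicalNo_alt (N : Int) = Bf N := by
  rcases Nat.eq_zero_or_pos N with hN0 | hN
  · subst hN0; decide
  · unfold magicalNo_alt Bf
    rw [if_neg (by exact_mod_cast by omega : ¬ (N : Int) ≤ 0), if_neg (by omega : ¬ N = 0)]
    have hmodN : PySem.Int.mod (N : Int) 2 = ((N % 2 : Nat) : Int) := by
      exact_mod_cast PySem.Int.mod_natCast N 2
    have hdivN : PySem.Int.floordiv (N : Int) 2 = ((N / 2 : Nat) : Int) := by
      exact_mod_cast PySem.Int.floordiv_natCast N 2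
    rcases Nat.mod_two_eq_zero_or_one N with h | h
    · rw [if_pos (by rw [hmodN, h]; rfl), if_pos h, hdivN]
    · rw [if_neg (by rw [hmodN, h]; exact one_ne_zero), if_neg (by omega : ¬ N % 2 = 0)]
      have hsub : (N : Int) - 1 = ((N - 1 : Nat) : Int) := by omega
      simp only [hsub]
      by_cases h1 : N = 1
      · subst h1; decide
      · rw [if_neg (by exact_mod_cast by omega : ¬ ((N - 1 : Nat) : Int) = 0)]
        have hdiv : PySem.Int.floordiv ((N - 1 : Nat) : Int) 2 = (((N - 1) / 2 : Nat) : Int) := by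
          exact_mod_cast PySem.Int.floordiv_natCast (N - 1) 2
        have hmod : PySem.Int.mod
            ((PySem.Int.bitLength ((N - 1 : Nat) : Int) +
              PySem.Int.bitCount ((N - 1 : Nat) : Int) : Nat) : Int) 2
            = (((PySem.Int.bitLength ((N - 1 : Nat) : Int) +
              PySem.Int.bitCount ((N - 1 : Nat) : Int)) % 2 : Nat) : Int) := by
          exact_mod_cast PySem.Int.mod_natCast _ 2
        rw [hdiv, hmod, show (N - 1) / 2 = N / 2 from by omega]
        unfold indN
        rw [if_neg (by omega : ¬ N - 1 = 0)]

lemma magicalNo_nat (N : Nat) : magicalNo (N : Int) = magicalNo_alt (N : Int) := by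
  rw [alt_eq_Bf]
  induction N with
  | zero =>
    rw [magicalNo, show ((0 : Nat) : Int) = 0 from rfl,
        PySem.List.pyRange_one_eq_nil (by omega : (0 : Int) ≤ 0)]
    decide
  | succ N ih =>
    rw [show ((N + 1 : Nat) : Int) = (N : Int) + 1 from by push_cast; ring]
    unfold magicalNo
    rw [PySem.List.pyRange_one_succ_right (by positivity : (0 : Int) ≤ (N : Int)),
        List.foldl_append]
    have hF : (PySem.List.pyRange 0 (N : Int) 1).foldl magicalBody 0 = magicalNo (N : Int) := rfl
    rw [List.foldl_cons, List.foldl_nil, hF, magicalBody_eq, ih, Bf_succ]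

-- ===== VERDICT (by name: the statement is the Claim_ definition above) =====
theorem magicalNo_spec : Claim_equal_magicalNo := by
  intro n _
  unfold Spec_magicalNo
  by_cases hn : n ≤ 0
  · rw [magicalNo, PySem.List.pyRange_one_eq_nil hn]
    simp [magicalNo_alt, hn]
  · have h : n = ((n.toNat : Nat) : Int) := by omega
    rw [h]
    exact magicalNo_nat n.toNat
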